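-- pv_equiv track=rewrite | github.com/amanchourasiya/leetcode | arista.py | maxconsucutive
-- ===== SOURCE A (Python) =====
-- def maxconsucutive(arr): # [80, 45, 40, 50, 40, 55, 65]
--     stack = [] # push append, pop() pop(-1) (value, #elelment)
--     res = []
--     for val in arr:
--         if len(stack) == 0:
--             res.append(1)
--             stack.append((val, 0))
--             continue
--         # TOS is less than curr value
--         tmpans = 0
--         while len(stack) >0 and  stack[-1][0] <= val:
--             tmpans+=stack[-1][1] + 1
--             stack.pop(-1)
--         stack.append((val, tmpans))
--         res.append(tmpans+1)
--
--     return res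
-- ===== SOURCE B (Python) =====
-- def maxconsucutive(arr):
--     res = []
--     prev = []
--     for val in arr:
--         count = 1
--         for p in reversed(prev):
--             if p <= val:
--                 count += 1
--             else:
--                 break
--         res.append(count)
--         prev.append(val)
--     return res
-- ===== Notes on version B (the rewrite author's own statement) =====
-- stated objective: simpler
-- what changed: Replaced the monotonic stack of (value, span) pairs with a direct backward scan of the previously seen elements (takeWhile over the reversed prefix), eliminating the auxiliary stack entirely.
import Mathlib
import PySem

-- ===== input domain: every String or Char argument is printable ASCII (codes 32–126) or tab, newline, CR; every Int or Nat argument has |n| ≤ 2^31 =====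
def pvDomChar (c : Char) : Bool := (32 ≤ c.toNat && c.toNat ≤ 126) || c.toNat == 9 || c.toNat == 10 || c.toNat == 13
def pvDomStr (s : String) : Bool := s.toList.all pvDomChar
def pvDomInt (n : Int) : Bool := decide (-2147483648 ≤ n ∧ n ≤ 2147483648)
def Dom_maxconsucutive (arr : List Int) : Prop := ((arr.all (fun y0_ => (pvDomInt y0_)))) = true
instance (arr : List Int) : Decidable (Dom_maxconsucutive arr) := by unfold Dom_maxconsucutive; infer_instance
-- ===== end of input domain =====

-- B replaces A's monotonic stack with a plain backward scan of the already-seen prefix (simpler, no stack).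

-- ===== PORT A =====
-- The Python stack's top (stack[-1]) is the HEAD of the Lean list.
-- The while-loop popping entries with value ≤ val and accumulating tmpans:
def popA (val : Int) : List (Int × Int) → Int × List (Int × Int)
  | [] => (0, [])
  | (v, c) :: rest =>
    if v ≤ val then
      let r := popA val rest
      (c + 1 + r.1, r.2)
    else (0, (v, c) :: rest)

-- one iteration of A's for-loop; state = (stack, res)
def stepA (st : List (Int × Int) × List Int) (val : Int) : List (Int × Int) × List Int :=
  if st.1.isEmpty then ((val, 0) :: st.1, st.2 ++ [1])
  else
    let pr := popA val st.1
    ((val, pr.1) :: pr.2, st.2 ++ [pr.1 + 1])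

def maxconsucutive (arr : List Int) : List Int :=
  (arr.foldl stepA ([], [])).2

-- ===== PORT B =====
-- one iteration of B's for-loop; state = (prev, res); the inner
-- for-with-break over reversed(prev) is takeWhile on the reversed prefix.
def stepB (st : List Int × List Int) (val : Int) : List Int × List Int :=
  let count : Int := 1 + ((st.1.reverse.takeWhile (fun p => p ≤ val)).length : Int)
  (st.1 ++ [val], st.2 ++ [count])

def maxconsucutive_alt (arr : List Int) : List Int :=
  (arr.foldl stepB ([], [])).2

-- ===== PRECONDITION & SPEC =====
def Spec_maxconsucutive (arr : List Int) (out : List Int) : Prop := out = maxconsucutive_alt arr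
instance (arr : List Int) (out : List Int) : Decidable (Spec_maxconsucutive arr out) := by unfold Spec_maxconsucutive; infer_instance

-- ===== CLAIM (what is proved, stated in full; the proofs are below) =====
def Claim_equal_maxconsucutive : Prop := ∀ (arr : List Int), Dom_maxconsucutive arr → Spec_maxconsucutive arr (maxconsucutive arr)

-- ===== LEMMAS AND PROOFS =====

-- the invariant tying A's stack to the prefix of elements processed so far:
-- each entry (v, c) carries the last element v of the remaining prefix and
-- c = length of the maximal ≤ v suffix before it.
def StkInv : List Int → List (Int × Int) → Prop
  | pre, [] => pre = []
  | pre, (v, c) :: S => ∃ q, pre = q ++ [v] ∧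
      c = ((q.reverse.takeWhile (fun p => p ≤ v)).length : Int) ∧
      StkInv ((q.reverse.dropWhile (fun p => p ≤ v)).reverse) S

theorem takeWhile_append_of_all {α : Type} (p : α → Bool) (t d : List α)
    (h : ∀ x ∈ t, p x = true) : (t ++ d).takeWhile p = t ++ d.takeWhile p := by
  induction t with
  | nil => simp
  | cons a t ih =>
    simp only [List.cons_append, List.takeWhile_cons]
    rw [h a (by simp)]
    simp [ih (fun x hx => h x (by simp [hx]))]

theorem dropWhile_append_of_all {α : Type} (p : α → Bool) (t d : List α)
    (h : ∀ x ∈ t, p x = true) : (t ++ d).dropWhile p = d.dropWhile p := by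
  induction t with
  | nil => simp
  | cons a t ih =>
    simp only [List.cons_append, List.dropWhile_cons]
    rw [h a (by simp)]
    simp [ih (fun x hx => h x (by simp [hx]))]

theorem popA_spec (S : List (Int × Int)) : ∀ (pre : List Int) (val : Int), StkInv pre S →
    (popA val S).1 = ((pre.reverse.takeWhile (fun p => p ≤ val)).length : Int) ∧
    StkInv ((pre.reverse.dropWhile (fun p => p ≤ val)).reverse) (popA val S).2 := by
  induction S with
  | nil =>
    intro pre val h
    simp only [StkInv] at h
    subst h
    simp [popA, StkInv]
  | cons e S ih =>
    intro pre val h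
    obtain ⟨v, c⟩ := e
    obtain ⟨q, hpre, hc, hrest⟩ := h
    subst hpre
    have hrev : (q ++ [v]).reverse = v :: q.reverse := by simp
    by_cases hv : v ≤ val
    · -- top popped
      have hall : ∀ x ∈ q.reverse.takeWhile (fun p => p ≤ v), decide (x ≤ val) = true := by
        intro x hx
        have := List.mem_takeWhile_imp hx
        simp only [decide_eq_true_eq] at this ⊢
        omega
      obtain ⟨ih1, ih2⟩ := ih _ val hrest
      have hsplit : q.reverse = q.reverse.takeWhile (fun p => p ≤ v) ++ q.reverse.dropWhile (fun p => p ≤ v) :=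
        (List.takeWhile_append_dropWhile).symm
      constructor
      · simp only [popA, if_pos hv]
        rw [hrev, List.takeWhile_cons]
        simp only [decide_eq_true_eq] at *
        rw [if_pos hv]
        conv_rhs => rw [hsplit]
        rw [takeWhile_append_of_all _ _ _ (fun x hx => by simpa using hall x hx)]
        simp only [List.length_cons, List.length_append]
        rw [ih1]
        simp only [List.reverse_reverse]
        push_cast
        omega
      · simp only [popA, if_pos hv]
        rw [hrev, List.dropWhile_cons]
        simp only [decide_eq_true_eq]
        rw [if_pos hv]
        conv_lhs => rw [hsplit]
        rw [dropWhile_append_of_all _ _ _ (fun x hx => by simpa using hall x hx)]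
        have := ih2
        simpa using this
    · -- top stays
      constructor
      · simp only [popA, if_neg hv]
        rw [hrev, List.takeWhile_cons]
        simp [hv]
      · simp only [popA, if_neg hv]
        rw [hrev, List.dropWhile_cons]
        simp only [decide_eq_true_eq]
        rw [if_neg hv]
        simp only [List.reverse_cons, List.reverse_reverse]
        exact ⟨q, rfl, hc, hrest⟩

theorem loop_eq (arr : List Int) : ∀ (pre : List Int) (S : List (Int × Int)) (res : List Int),
    StkInv pre S → (arr.foldl stepA (S, res)).2 = (arr.foldl stepB (pre, res)).2 := by
  induction arr with
  | nil => intro pre S res _; simp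
  | cons val t ih =>
    intro pre S res hInv
    simp only [List.foldl_cons]
    cases S with
    | nil =>
      have hpre : pre = [] := hInv
      subst hpre
      have h1 : stepA ([], res) val = ([(val, 0)], res ++ [1]) := by
        simp [stepA]
      have h2 : stepB ([], res) val = ([val], res ++ [1]) := by
        simp [stepB]
      rw [h1, h2]
      apply ih
      exact ⟨[], rfl, by simp, by simp [StkInv]⟩
    | cons e S0 =>
      obtain ⟨h1, h2⟩ := popA_spec (e :: S0) pre val hInv
      have hA : stepA (e :: S0, res) val
          = ((val, (popA val (e :: S0)).1) :: (popA val (e :: S0)).2,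
             res ++ [(popA val (e :: S0)).1 + 1]) := by
        simp [stepA]
      have hB : stepB (pre, res) val
          = (pre ++ [val],
             res ++ [1 + ((pre.reverse.takeWhile (fun p => p ≤ val)).length : Int)]) := by
        simp [stepB]
      rw [hA, hB, h1]
      have hrw : ((pre.reverse.takeWhile (fun p => p ≤ val)).length : Int) + 1
          = 1 + ((pre.reverse.takeWhile (fun p => p ≤ val)).length : Int) := by omega
      rw [hrw]
      apply ih
      exact ⟨pre, rfl, h1.symm ▸ rfl, h2⟩

-- ===== VERDICT (by name: the statement is the Claim_ definition above) =====
theorem maxconsucutive_spec : Claim_equal_maxconsucutive := by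
  intro arr _
  unfold Spec_maxconsucutive maxconsucutive maxconsucutive_alt
  exact loop_eq arr [] [] [] rfl
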